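-- pv_equiv track=rewrite | github.com/JRRLino/Appointment-Book | agenda_win.py | checagem
-- ===== SOURCE A (Python) =====
-- def prioridadeLetraValida(char):
--     if(len(char) == 1):
--         if (ord(char) >= ord('A') and ord(char) <= ord('Z')) or (ord(char) >= ord('a') and ord(char) <= ord('z')):
--             return True;
--
--     return False;
--
-- def checagem(tupla_lista,filtro):
--
--     if tupla_lista == []:
--         return False;
--
--     if(prioridadeLetraValida(filtro)):
--         if(tupla_lista[0] == '('+filtro+')'):
--             return True;
--     else:
--         if(tupla_lista[0] == filtro):
--             return True;
--
--     tupla_lista.pop(0);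
--     return checagem(tupla_lista,filtro);
-- ===== SOURCE B (Python) =====
-- def checagem(tupla_lista, filtro):
--     # Compute the match target once, then a single membership test.
--     # NOTE: unlike A, this does not mutate tupla_lista (A pops scanned elements);
--     # the equivalence claimed is about the return value only.
--     if len(filtro) == 1 and filtro.isalpha():
--         target = '(' + filtro + ')'
--     else:
--         target = filtro
--     return target in tupla_lista
-- ===== Notes on version B (the rewrite author's own statement) =====
-- stated objective: faster
-- what changed: Replaces the pop-and-recurse scan (each pop(0) shifts the whole list) with computing the formatted target once and a single built-in membership test; B does not mutate the argument list, the equivalence is about the return value.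
import Mathlib
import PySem

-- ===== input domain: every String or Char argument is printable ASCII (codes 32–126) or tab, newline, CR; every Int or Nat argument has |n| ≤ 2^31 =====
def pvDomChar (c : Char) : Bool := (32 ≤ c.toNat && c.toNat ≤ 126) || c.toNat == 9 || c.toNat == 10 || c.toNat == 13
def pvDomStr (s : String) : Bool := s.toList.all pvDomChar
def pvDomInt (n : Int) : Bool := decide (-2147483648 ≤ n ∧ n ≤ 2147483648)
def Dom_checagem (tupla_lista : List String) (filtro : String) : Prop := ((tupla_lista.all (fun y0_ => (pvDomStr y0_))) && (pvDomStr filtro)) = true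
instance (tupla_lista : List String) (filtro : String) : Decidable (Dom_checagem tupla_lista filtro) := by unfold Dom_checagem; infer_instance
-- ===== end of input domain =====

-- ===== PORT A =====
-- ord(char) on a length-1 string is the code of its single character (exact on Dom)
def prioridadeLetraValida (char : String) : Bool :=
  if PySem.Str.len char == 1 then
    match char.toList with
    | [c] => ('A'.toNat <= c.toNat && c.toNat <= 'Z'.toNat) ||
             ('a'.toNat <= c.toNat && c.toNat <= 'z'.toNat)
    | _ => false
  else false

-- A pops scanned elements off tupla_lista; the equivalence here is about the return value only.
def checagem (tupla_lista : List String) (filtro : String) : Bool :=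
  match tupla_lista with
  | [] => false
  | x :: rest =>
    if prioridadeLetraValida filtro then
      if x == "(" ++ filtro ++ ")" then true
      else checagem rest filtro
    else
      if x == filtro then true
      else checagem rest filtro

-- ===== PORT B =====
-- B: compute the target once, then one membership test (no mutation).
def checagem_alt (tupla_lista : List String) (filtro : String) : Bool :=
  let target :=
    if PySem.Str.len filtro == 1 && PySem.Str.strIsalpha filtro then "(" ++ filtro ++ ")"
    else filtro
  tupla_lista.contains target

-- ===== PRECONDITION & SPEC =====
def Spec_checagem (tupla_lista : List String) (filtro : String) (out : Bool) : Prop := out = checagem_alt tupla_lista filtro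
instance (tupla_lista : List String) (filtro : String) (out : Bool) : Decidable (Spec_checagem tupla_lista filtro out) := by unfold Spec_checagem; infer_instance

-- ===== CLAIM (what is proved, stated in full; the proofs are below) =====
def Claim_equal_checagem : Prop := ∀ (tupla_lista : List String) (filtro : String), Dom_checagem tupla_lista filtro → Spec_checagem tupla_lista filtro (checagem tupla_lista filtro)

-- ===== LEMMAS AND PROOFS =====

-- Char-code comparison (A's ord test) is the Char order (B's isalpha ranges)
theorem decide_toNat_le (a b : Char) : decide (a.toNat ≤ b.toNat) = decide (a ≤ b) := by
  apply decide_eq_decide.mpr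
  rw [Char.le_def, UInt32.le_iff_toNat_le]
  exact Iff.rfl

-- A's single-letter test equals B's len==1 && isalpha test
theorem prioridade_eq (f : String) :
    prioridadeLetraValida f = (PySem.Str.len f == 1 && PySem.Str.strIsalpha f) := by
  unfold prioridadeLetraValida
  rw [PySem.Str.len_eq, PySem.Str.strIsalpha_eq]
  cases h : f.toList with
  | nil => simp [PySem.Chars.strIsalpha]
  | cons c cs =>
    cases cs with
    | cons d ds => simp [PySem.Chars.strIsalpha]; omega
    | nil =>
      simp only [List.length_cons, List.length_nil, Nat.zero_add, Nat.cast_one,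
        beq_self_eq_true, PySem.Chars.strIsalpha, List.isEmpty_cons,
        Bool.not_false, List.all_cons, List.all_nil, Bool.and_true, Bool.true_and]
      simp only [PySem.Chars.isalpha, PySem.Chars.isupper, PySem.Chars.islower,
        decide_toNat_le, if_pos trivial]

-- A's recursive scan returns exactly membership of the fixed target
theorem checagem_eq_contains (l : List String) (t target : String)
    (htgt : target = (if PySem.Str.len t == 1 && PySem.Str.strIsalpha t then "(" ++ t ++ ")" else t)) :
    checagem l t = l.contains target := by
  induction l with
  | nil => simp [checagem]
  | cons x rest ih =>
    rw [checagem, prioridade_eq]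
    cases hp : (PySem.Str.len t == 1 && PySem.Str.strIsalpha t) with
    | true =>
      have ht' : target = "(" ++ t ++ ")" := by rw [htgt, hp]; exact if_pos rfl
      rw [if_pos rfl, List.contains_cons, ht']
      cases hx : (x == ("(" ++ t ++ ")" : String)) with
      | true =>
        have h2 : (("(" ++ t ++ ")" : String) == x) = true := by
          rw [beq_iff_eq] at hx ⊢; exact hx.symm
        rw [if_pos rfl, h2, Bool.true_or]
      | false =>
        have h2 : (("(" ++ t ++ ")" : String) == x) = false := by
          rw [beq_eq_false_iff_ne] at hx ⊢; exact fun h => hx h.symm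
        rw [if_neg Bool.false_ne_true, h2, Bool.false_or, ih, ht']
    | false =>
      have ht' : target = t := by rw [htgt, hp]; exact if_neg Bool.false_ne_true
      rw [if_neg Bool.false_ne_true, List.contains_cons, ht']
      cases hx : (x == t) with
      | true =>
        have h2 : (t == x) = true := by
          rw [beq_iff_eq] at hx ⊢; exact hx.symm
        rw [if_pos rfl, h2, Bool.true_or]
      | false =>
        have h2 : (t == x) = false := by
          rw [beq_eq_false_iff_ne] at hx ⊢; exact fun h => hx h.symm
        rw [if_neg Bool.false_ne_true, h2, Bool.false_or, ih, ht']

-- ===== VERDICT (by name: the statement is the Claim_ definition above) =====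
theorem checagem_spec : Claim_equal_checagem := by
  intro l f _
  unfold Spec_checagem checagem_alt
  exact checagem_eq_contains l f _ rfl
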